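-- pv_equiv track=rewrite | github.com/gordonwatts/func_adl_servicex_type_generator | func_adl_servicex_type_generator/package.py | count_pointer_depth
-- ===== SOURCE A (Python) =====
-- from typing import Any, Dict, Iterable, List, Optional, Set, Tuple
--
-- def count_pointer_depth(cpp_class_name: Optional[str]) -> int:
--     """Count number of pointer levels in this declaration
--
--     Args:
--         cpp_class_name (Optional[str]): Class name to do counting on.
--         If None, then return zero
--
--     Returns:
--         int: How many pointers
--     """
--     if cpp_class_name is None:
--         return 0
--
--     cpp_class_name = cpp_class_name.strip()
--     count = 0
--     while cpp_class_name.endswith("*"):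
--         cpp_class_name = cpp_class_name[:-1].strip()
--         count += 1
--     return count
-- ===== SOURCE B (Python) =====
-- def count_pointer_depth(cpp_class_name):
--     """Count number of pointer levels in this declaration.
--
--     Single backward index scan: skip whitespace and count '*' from the end,
--     stop at the first other character. No repeated slicing/stripping.
--     """
--     if cpp_class_name is None:
--         return 0
--     s = cpp_class_name
--     i = len(s) - 1
--     count = 0
--     while i >= 0:
--         c = s[i]
--         if c.isspace():
--             i -= 1
--         elif c == '*':
--             count += 1
--             i -= 1
--         else:
--             break
--     return count
-- ===== Notes on version B (the rewrite author's own statement) =====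
-- stated objective: alternative
-- what changed: Replaces the repeated endswith/slice/strip loop (which rebuilds the stripped string on every counted star) by a single backward index scan that skips whitespace and counts the stars in one pass.
import Mathlib
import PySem

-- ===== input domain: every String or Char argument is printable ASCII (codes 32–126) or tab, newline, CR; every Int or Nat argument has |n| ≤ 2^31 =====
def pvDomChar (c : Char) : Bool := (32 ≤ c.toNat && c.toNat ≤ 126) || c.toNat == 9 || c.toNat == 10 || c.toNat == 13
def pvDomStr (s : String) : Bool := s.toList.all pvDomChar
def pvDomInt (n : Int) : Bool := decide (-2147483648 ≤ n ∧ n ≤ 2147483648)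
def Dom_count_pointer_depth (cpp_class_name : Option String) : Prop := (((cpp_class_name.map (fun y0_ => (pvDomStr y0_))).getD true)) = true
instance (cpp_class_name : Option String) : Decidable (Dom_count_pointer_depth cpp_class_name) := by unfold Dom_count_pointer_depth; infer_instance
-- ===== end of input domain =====

-- B replaces A's repeated strip/slice loop by a single backward scan that skips
-- whitespace and counts the stars in one pass (objective: alternative single-scan algorithm).


-- ===== PORT A =====
-- helper facts aLoop's termination cites
theorem strip_length_le (l : List Char) : (PySem.Chars.strip l).length ≤ l.length := by
  simp only [PySem.Chars.strip, PySem.Chars.rstrip, PySem.Chars.lstrip, List.length_reverse]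
  exact le_trans (List.length_dropWhile_le _ _)
    (by simpa using List.length_dropWhile_le PySem.Chars.isspace l)

theorem slice_neg_one (cs : List Char) : PySem.Chars.slice cs none (some (-1)) = cs.dropLast := by
  simp [pysem]

-- the `while cpp_class_name.endswith("*")` loop of A, over the char list, with the `count` accumulator
def aLoop (cs : List Char) (count : Int) : Int :=
  if PySem.Chars.endswith cs ['*'] then
    -- cpp_class_name = cpp_class_name[:-1].strip(); count += 1
    aLoop (PySem.Chars.strip (PySem.Chars.slice cs none (some (-1)))) (count + 1)
  else count
termination_by cs.length
decreasing_by
  have hne : cs ≠ [] := by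
    rintro rfl; simp [PySem.Chars.endswith, List.isSuffixOf] at *
  calc (PySem.Chars.strip (PySem.Chars.slice cs none (some (-1)))).length
      ≤ (PySem.Chars.slice cs none (some (-1))).length := strip_length_le _
    _ = cs.dropLast.length := by rw [slice_neg_one]
    _ < cs.length := by
        have := List.length_pos_iff.mpr hne
        simp only [List.length_dropLast]; omega

def count_pointer_depth (cpp_class_name : Option String) : Int :=
  match cpp_class_name with
  | none => 0
  | some s => aLoop (PySem.Chars.strip s.toList) 0   -- cpp_class_name = cpp_class_name.strip(); count = 0

-- ===== PORT B =====
-- backward index scan of B, rendered as a walk down the reversed char list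
def bLoop (r : List Char) (count : Int) : Int :=
  match r with
  | [] => count
  | c :: rest =>
    if PySem.Chars.isspace c then bLoop rest count
    else if c = '*' then bLoop rest (count + 1)
    else count

def count_pointer_depth_alt (cpp_class_name : Option String) : Int :=
  match cpp_class_name with
  | none => 0
  | some s => bLoop s.toList.reverse 0

-- ===== PRECONDITION & SPEC =====
def Spec_count_pointer_depth (cpp_class_name : Option String) (out : Int) : Prop := out = count_pointer_depth_alt cpp_class_name
instance (cpp_class_name : Option String) (out : Int) : Decidable (Spec_count_pointer_depth cpp_class_name out) := by unfold Spec_count_pointer_depth; infer_instance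

-- ===== CLAIM (what is proved, stated in full; the proofs are below) =====
def Claim_equal_count_pointer_depth : Prop := ∀ (cpp_class_name : Option String), Dom_count_pointer_depth cpp_class_name → Spec_count_pointer_depth cpp_class_name (count_pointer_depth cpp_class_name)

-- ===== LEMMAS AND PROOFS =====

theorem bLoop_ws (w : List Char) (hw : ∀ c ∈ w, PySem.Chars.isspace c = true) (count : Int) :
    bLoop w count = count := by
  induction w with
  | nil => rfl
  | cons c rest ih =>
    simp [bLoop, hw c (by simp), ih (fun c hc => hw c (by simp [hc]))]

theorem bLoop_append_ws (r w : List Char) (hw : ∀ c ∈ w, PySem.Chars.isspace c = true)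
    (count : Int) : bLoop (r ++ w) count = bLoop r count := by
  induction r generalizing count with
  | nil => simpa [bLoop] using bLoop_ws w hw count
  | cons c rest ih =>
    show bLoop (c :: (rest ++ w)) count = bLoop (c :: rest) count
    simp only [bLoop]
    split_ifs <;> first | exact ih _ | rfl

theorem bLoop_dropWhile (r : List Char) (count : Int) :
    bLoop (r.dropWhile PySem.Chars.isspace) count = bLoop r count := by
  induction r with
  | nil => rfl
  | cons c rest ih =>
    by_cases h : PySem.Chars.isspace c
    · rw [List.dropWhile_cons_of_pos h, ih]
      simp [bLoop, h]
    · rw [List.dropWhile_cons_of_neg h]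

theorem bLoop_accum (r : List Char) (count : Int) : bLoop r count = count + bLoop r 0 := by
  induction r generalizing count with
  | nil => simp [bLoop]
  | cons c rest ih =>
    simp only [bLoop]
    split_ifs
    · exact ih count
    · rw [ih (count + 1), ih (0 + 1)]; ring
    · omega

theorem aLoop_accum (n : ℕ) : ∀ cs : List Char, cs.length ≤ n → ∀ count : Int,
    aLoop cs count = count + aLoop cs 0 := by
  induction n with
  | zero =>
    intro cs h count
    obtain rfl : cs = [] := List.length_eq_zero_iff.mp (Nat.le_zero.mp h)
    simp [aLoop, PySem.Chars.endswith, List.isSuffixOf]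
  | succ n ih =>
    intro cs hlen count
    rw [aLoop]
    conv_rhs => rw [aLoop]
    by_cases hend : PySem.Chars.endswith cs ['*'] = true
    · rw [if_pos hend, if_pos hend, slice_neg_one]
      have hne : cs ≠ [] := by
        rintro rfl; simp [PySem.Chars.endswith, List.isSuffixOf] at hend
      have hlt : (PySem.Chars.strip cs.dropLast).length ≤ n := by
        have h1 := strip_length_le cs.dropLast
        have := List.length_pos_iff.mpr hne
        simp only [List.length_dropLast] at h1
        omega
      rw [ih _ hlt (count + 1), ih _ hlt (0 + 1)]
      ring
    · rw [if_neg hend, if_neg hend]; omega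

theorem aLoop_accum' (cs : List Char) (count : Int) : aLoop cs count = count + aLoop cs 0 :=
  aLoop_accum cs.length cs le_rfl count

-- the reverse of the stripped list is the whitespace-dropped reverse of the whitespace-dropped list
theorem strip_reverse (cs : List Char) :
    (PySem.Chars.strip cs).reverse =
      ((cs.dropWhile PySem.Chars.isspace).reverse).dropWhile PySem.Chars.isspace := by
  simp [PySem.Chars.strip, PySem.Chars.rstrip, PySem.Chars.lstrip]

theorem bLoop_strip (cs : List Char) (count : Int) :
    bLoop ((PySem.Chars.strip cs).reverse) count = bLoop cs.reverse count := by
  rw [strip_reverse, bLoop_dropWhile]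
  conv_rhs => rw [← List.takeWhile_append_dropWhile (p := PySem.Chars.isspace) (l := cs)]
  rw [List.reverse_append]
  exact (bLoop_append_ws _ _ (fun c hc => List.mem_takeWhile_imp (List.mem_reverse.mp hc)) count).symm

theorem aLoop_strip_eq (n : ℕ) : ∀ cs : List Char, cs.length ≤ n →
    aLoop (PySem.Chars.strip cs) 0 = bLoop cs.reverse 0 := by
  induction n with
  | zero =>
    intro cs h
    obtain rfl : cs = [] := List.length_eq_zero_iff.mp (Nat.le_zero.mp h)
    rw [show PySem.Chars.strip [] = [] from rfl, aLoop]
    simp [PySem.Chars.endswith, List.isSuffixOf, bLoop]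
  | succ n ih =>
    intro cs hlen
    rw [← bLoop_strip]
    set t := PySem.Chars.strip cs with ht
    have htlen : t.length ≤ cs.length := strip_length_le cs
    have hdrop : t.reverse.dropWhile PySem.Chars.isspace = t.reverse := by
      rw [ht, strip_reverse]
      exact List.dropWhile_idempotent _ _
    match hrev : t.reverse with
    | [] =>
      have ht0 : t = [] := by simpa using congrArg List.reverse hrev
      rw [ht0]
      simp [aLoop, PySem.Chars.endswith, List.isSuffixOf, bLoop]
    | c :: rest =>
      have htc : t = rest.reverse ++ [c] := by
        have := congrArg List.reverse hrev; simpa using this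
      have hdl : t.dropLast = rest.reverse := by
        rw [htc]; simp
      by_cases hstar : c = '*'
      · subst hstar
        have hend : PySem.Chars.endswith t ['*'] = true :=
          (PySem.Chars.endswith_iff t ['*']).mpr (htc ▸ List.suffix_append _ _)
        rw [aLoop, if_pos hend, slice_neg_one, hdl]
        have hihlen : (rest.reverse).length ≤ n := by
          have : rest.length + 1 = t.length := by rw [htc]; simp
          simp only [List.length_reverse]; omega
        rw [aLoop_accum' _ (0 + 1), ih rest.reverse hihlen]
        have hws : PySem.Chars.isspace '*' = false := by decide
        simp only [List.reverse_reverse, bLoop, hws, Bool.false_eq_true, if_false]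
        rw [bLoop_accum rest (0 + 1)]
        simp
      · have hws : PySem.Chars.isspace c = false := by
          rcases h' : PySem.Chars.isspace c with _ | _
          · rfl
          · exfalso
            have hx : (c :: rest).dropWhile PySem.Chars.isspace = c :: rest := by
              rw [← hrev, hdrop]
            rw [List.dropWhile_cons_of_pos h'] at hx
            have hlen2 := congrArg List.length hx
            have := List.length_dropWhile_le PySem.Chars.isspace rest
            simp at hlen2
            omega
        have hend : PySem.Chars.endswith t ['*'] = false := by
          rcases h' : PySem.Chars.endswith t ['*'] with _ | _
          · rfl
          · exfalso
            obtain ⟨u, hu⟩ := (PySem.Chars.endswith_iff t ['*']).mp h'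
            have h1 : t.getLast? = some '*' := by rw [← hu]; exact List.getLast?_concat
            have h2 : t.getLast? = some c := by rw [htc]; exact List.getLast?_concat
            rw [h1] at h2
            exact hstar (Option.some.inj h2).symm
        rw [aLoop, if_neg (by simp [hend])]
        simp [bLoop, hws, hstar]

-- ===== VERDICT (by name: the statement is the Claim_ definition above) =====
theorem count_pointer_depth_spec : Claim_equal_count_pointer_depth := by
  intro cpp_class_name _
  unfold Spec_count_pointer_depth count_pointer_depth count_pointer_depth_alt
  match cpp_class_name with
  | none => rfl
  | some s => exact aLoop_strip_eq s.toList.length s.toList le_rfl
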